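-- pv_equiv track=rewrite | github.com/minmooo-ya/Baek | 백준/Silver/1388. 바닥 장식/바닥 장식.py | count_wood
-- ===== SOURCE A (Python) =====
-- from collections import deque
--
-- def bfs(x, y, graph, visited, N, M):
--     q = deque([(x, y)])
--     visited[x][y] = True
--     dx, dy = (0, 1) if graph[x][y] == '-' else (1, 0) # 가로 세로 나누기
--
--     while q:
--         cx, cy = q.popleft()
--         nx, ny = cx + dx, cy + dy
--         #유효한 값인지 방문했는지 같은 - or  | 인지 체크크
--         if 0 <= nx < N and 0 <= ny < M and not visited[nx][ny] and graph[nx][ny] == graph[cx][cy]: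
--             visited[nx][ny] = True
--             q.append((nx, ny))
--
-- def count_wood(N, M, wood_list):
--     visited = [[False] * M for _ in range(N)]
--     count = 0
--
--     for i in range(N):
--         for j in range(M):
--             if not visited[i][j]:
--                 bfs(i, j, wood_list, visited, N, M)
--                 count += 1
--
--     return count
-- ===== SOURCE B (Python) =====
-- def count_wood(N, M, wood_list):
--     count = 0
--     for i in range(N):
--         for j in range(M):
--             c = wood_list[i][j]
--             if c == '-':
--                 if j == 0 or wood_list[i][j - 1] != '-':
--                     count += 1
--             else:
--                 if i == 0 or wood_list[i - 1][j] != c: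
--                     count += 1
--     return count
-- ===== Notes on version B (the rewrite author's own statement) =====
-- stated objective: simpler
-- what changed: Replaced the BFS flood-fill with queue and visited matrix by a stateless scan that counts run starts: a '-' cell whose left neighbour is not '-', or a non-'-' cell whose upper neighbour differs, begins exactly one piece.
import Mathlib
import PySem

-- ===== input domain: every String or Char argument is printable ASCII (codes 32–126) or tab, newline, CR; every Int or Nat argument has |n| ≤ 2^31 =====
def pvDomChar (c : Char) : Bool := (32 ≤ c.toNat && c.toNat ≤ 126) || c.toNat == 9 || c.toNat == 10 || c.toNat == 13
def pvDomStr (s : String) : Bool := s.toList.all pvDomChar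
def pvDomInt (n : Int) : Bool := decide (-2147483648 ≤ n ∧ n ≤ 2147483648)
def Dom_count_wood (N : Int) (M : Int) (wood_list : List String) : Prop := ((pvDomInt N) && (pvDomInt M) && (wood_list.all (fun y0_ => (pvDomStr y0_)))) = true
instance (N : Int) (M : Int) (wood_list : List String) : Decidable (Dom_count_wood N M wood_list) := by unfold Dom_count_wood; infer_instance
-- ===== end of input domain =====

-- B drops A's BFS flood-fill (queue + visited matrix) and counts the pieces directly:
-- each piece is counted at its run start, in one stateless scan (objective: simpler; same O(N*M) cost).

-- ===== PORT A =====
-- graph[x][y]; only evaluated at in-range indices (Pre_ guarantees that)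
def pvGrid (g : List String) (x y : Int) : Char :=
  ((g.getD x.toNat "").toList).getD y.toNat ' '

-- visited[x][y]
def pvVGet (v : List (List Bool)) (x y : Int) : Bool :=
  (v.getD x.toNat []).getD y.toNat false

-- visited[x][y] = True
def pvVSet (v : List (List Bool)) (x y : Int) : List (List Bool) :=
  v.modify x.toNat (fun row => row.set y.toNat true)

-- the 'while q' loop of bfs; the queue marks one fresh cell per iteration, so
-- N.toNat*M.toNat+1 fuel is never exhausted (proved via the walk lemmas below)
def pvBfsLoop : Nat → List (Int × Int) → List String → List (List Bool) → Int → Int → Int → Int → List (List Bool)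
  | 0, _, _, v, _, _, _, _ => v
  | _ + 1, [], _, v, _, _, _, _ => v
  | fuel + 1, (cx, cy) :: qs, g, v, N, M, dx, dy =>
      let nx := cx + dx
      let ny := cy + dy
      if 0 ≤ nx ∧ nx < N ∧ 0 ≤ ny ∧ ny < M ∧ pvVGet v nx ny = false ∧ pvGrid g nx ny = pvGrid g cx cy then
        pvBfsLoop fuel (qs ++ [(nx, ny)]) g (pvVSet v nx ny) N M dx dy
      else
        pvBfsLoop fuel qs g v N M dx dy

def pvBfs (x y : Int) (g : List String) (v : List (List Bool)) (N M : Int) : List (List Bool) :=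
  let v1 := pvVSet v x y
  let d : Int × Int := if pvGrid g x y = '-' then (0, 1) else (1, 0)
  pvBfsLoop (N.toNat * M.toNat + 1) [(x, y)] g v1 N M d.1 d.2

-- the inner 'for j in range(M)' loop of count_wood
def pvInner (g : List String) (N M : Int) (i : Int) (s : List (List Bool) × Int) : List (List Bool) × Int :=
  (PySem.List.pyRange 0 M 1).foldl
    (fun s j => if pvVGet s.1 i j = false then (pvBfs i j g s.1 N M, s.2 + 1) else s) s

def count_wood (N : Int) (M : Int) (wood_list : List String) : Int :=
  let visited := List.replicate N.toNat (List.replicate M.toNat false)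
  ((PySem.List.pyRange 0 N 1).foldl (fun s i => pvInner wood_list N M i s) (visited, 0)).2

-- ===== PORT B =====
def count_wood_alt (N : Int) (M : Int) (wood_list : List String) : Int :=
  (PySem.List.pyRange 0 N 1).foldl (fun c i =>
    (PySem.List.pyRange 0 M 1).foldl (fun c j =>
      if pvGrid wood_list i j = '-' then
        if j = 0 ∨ ¬ pvGrid wood_list i (j - 1) = '-' then c + 1 else c
      else
        if i = 0 ∨ ¬ pvGrid wood_list (i - 1) j = pvGrid wood_list i j then c + 1 else c) c) 0

-- ===== PRECONDITION & SPEC =====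
-- Pre_ excludes exactly the inputs where the Python A raises IndexError (and B raises it too):
-- N>0 and M>0 but the grid is missing a row among the first N or one of those rows is shorter than M.
def Pre_count_wood (N : Int) (M : Int) (wood_list : List String) : Prop :=
  0 < N → 0 < M →
    (N ≤ (wood_list.length : Int) ∧ ∀ r ∈ wood_list.take N.toNat, M ≤ (r.length : Int))
instance (N : Int) (M : Int) (wood_list : List String) : Decidable (Pre_count_wood N M wood_list) := by
  unfold Pre_count_wood; infer_instance

def pvWitness_count_wood : Int × Int × List String := (2, 2, ["-|", "-|"])

def Spec_count_wood (N : Int) (M : Int) (wood_list : List String) (out : Int) : Prop := out = count_wood_alt N M wood_list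
instance (N : Int) (M : Int) (wood_list : List String) (out : Int) : Decidable (Spec_count_wood N M wood_list out) := by unfold Spec_count_wood; infer_instance

-- ===== CLAIM (what is proved, stated in full; the proofs are below) =====
def Claim_equal_count_wood : Prop := ∀ (N : Int) (M : Int) (wood_list : List String), Dom_count_wood N M wood_list → Pre_count_wood N M wood_list → Spec_count_wood N M wood_list (count_wood N M wood_list)

-- ===== LEMMAS AND PROOFS =====

-- the cell character, indexed by naturals
def cN (g : List String) (i j : Nat) : Char := ((g.getD i "").toList).getD j ' '

theorem pvGrid_cast (g : List String) (a b : Int) : pvGrid g a b = cN g a.toNat b.toNat := rfl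

-- start column of the horizontal '-'-run through column j in row i
def pvHS (g : List String) (i : Nat) : Nat → Nat
  | 0 => 0
  | j + 1 => if cN g i j = '-' then pvHS g i j else j + 1

-- start row of the vertical equal-character run through row i in column j
def pvVS (g : List String) (j : Nat) : Nat → Nat
  | 0 => 0
  | i + 1 => if cN g i j = cN g (i + 1) j then pvVS g j i else i + 1

-- the start cell of the piece containing (i, j)
def pvSC (g : List String) (i j : Nat) : Nat × Nat :=
  if cN g i j = '-' then (i, pvHS g i j) else (pvVS g j i, j)

-- row-major index
def pvRM (m : Nat) (p : Nat × Nat) : Nat := p.1 * m + p.2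

-- the visited matrix after the scan has passed k cells: cell visited iff its
-- piece's start cell was already scanned
def pvVb (g : List String) (m k : Nat) (x y : Nat) : Bool := decide (pvRM m (pvSC g x y) < k)

def pvMk (n m : Nat) (f : Nat → Nat → Bool) : List (List Bool) :=
  (List.range n).map fun x => (List.range m).map fun y => f x y

theorem pvHS_le (g : List String) (i j : Nat) : pvHS g i j ≤ j := by
  induction j with
  | zero => simp [pvHS]
  | succ j ih => simp only [pvHS]; split <;> omega

theorem pvVS_le (g : List String) (j i : Nat) : pvVS g j i ≤ i := by
  induction i with
  | zero => simp [pvVS]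
  | succ i ih => simp only [pvVS]; split <;> omega

theorem pvHS_all (g : List String) (i j t : Nat) (h1 : pvHS g i j ≤ t) (h2 : t < j) :
    cN g i t = '-' := by
  induction j with
  | zero => omega
  | succ j ih =>
    simp only [pvHS] at h1
    split at h1
    · rcases Nat.lt_succ_iff_lt_or_eq.mp h2 with h | h
      · exact ih h1 h
      · subst h; assumption
    · omega

theorem pvVS_all (g : List String) (j i t : Nat) (h1 : pvVS g j i ≤ t) (h2 : t ≤ i) :
    cN g t j = cN g i j := by
  induction i with
  | zero => rw [show t = 0 by omega]
  | succ i ih =>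
    simp only [pvVS] at h1 ⊢
    by_cases hc : cN g i j = cN g (i + 1) j
    · rw [if_pos hc] at h1
      rcases Nat.le_succ_iff.mp h2 with h | h
      · rw [← hc]; exact ih h1 h
      · subst h; rfl
    · rw [if_neg hc] at h1
      have : t = i + 1 := by omega
      subst this; rfl

theorem pvHS_congr (g : List String) (i j t : Nat) (h1 : pvHS g i j ≤ t) (h2 : t ≤ j) :
    pvHS g i t = pvHS g i j := by
  induction j with
  | zero => rw [show t = 0 by omega]
  | succ j ih =>
    rcases Nat.le_succ_iff.mp h2 with h | h
    · by_cases hc : cN g i j = '-'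
      · rw [pvHS, if_pos hc] at h1 ⊢
        exact ih h1 h
      · rw [pvHS, if_neg hc] at h1
        omega
    · subst h; rfl

theorem pvVS_congr (g : List String) (j i t : Nat) (h1 : pvVS g j i ≤ t) (h2 : t ≤ i) :
    pvVS g j t = pvVS g j i := by
  induction i with
  | zero => rw [show t = 0 by omega]
  | succ i ih =>
    rcases Nat.le_succ_iff.mp h2 with h | h
    · by_cases hc : cN g i j = cN g (i + 1) j
      · rw [pvVS, if_pos hc] at h1 ⊢
        exact ih h1 h
      · rw [pvVS, if_neg hc] at h1
        omega
    · subst h; rfl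

theorem pvHS_of_run (g : List String) (i j y : Nat) (hjy : j ≤ y)
    (hst : pvHS g i j = j) (hall : ∀ t, j ≤ t → t < y → cN g i t = '-') :
    pvHS g i y = j := by
  induction y, hjy using Nat.le_induction with
  | base => exact hst
  | succ y hy ih =>
    simp only [pvHS]
    rw [if_pos (hall y hy (by omega))]
    exact ih fun t h1 h2 => hall t h1 (by omega)

theorem pvVS_of_run (g : List String) (j i x : Nat) (hix : i ≤ x)
    (hst : pvVS g j i = i) (hall : ∀ t, i ≤ t → t ≤ x → cN g t j = cN g i j) :
    pvVS g j x = i := by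
  induction x, hix using Nat.le_induction with
  | base => exact hst
  | succ x hx ih =>
    simp only [pvVS]
    rw [if_pos (by rw [hall x hx (by omega), hall (x+1) (by omega) (by omega)])]
    exact ih fun t h1 h2 => hall t h1 (by omega)

theorem pvHS_self_iff (g : List String) (i j : Nat) :
    pvHS g i j = j ↔ (j = 0 ∨ cN g i (j - 1) ≠ '-') := by
  cases j with
  | zero => simp [pvHS]
  | succ j =>
    simp only [pvHS, Nat.add_sub_cancel]
    constructor
    · intro h
      right; intro hc
      rw [if_pos hc] at h
      have := pvHS_le g i j; omega
    · rintro (h | h)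
      · omega
      · rw [if_neg h]

theorem pvVS_self_iff (g : List String) (j i : Nat) :
    pvVS g j i = i ↔ (i = 0 ∨ cN g (i - 1) j ≠ cN g i j) := by
  cases i with
  | zero => simp [pvVS]
  | succ i =>
    simp only [pvVS, Nat.add_sub_cancel]
    constructor
    · intro h
      right; intro hc
      rw [if_pos hc] at h
      have := pvVS_le g j i; omega
    · rintro (h | h)
      · omega
      · rw [if_neg h]

-- character at the start cell
theorem pvHS_char (g : List String) (i j : Nat) (h : cN g i j = '-') :
    cN g i (pvHS g i j) = '-' := by
  rcases Nat.lt_or_ge (pvHS g i j) j with hlt | hge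
  · exact pvHS_all g i j _ le_rfl hlt
  · have := pvHS_le g i j
    have : pvHS g i j = j := by omega
    rw [this]; exact h

theorem pvVS_char (g : List String) (j i : Nat) :
    cN g (pvVS g j i) j = cN g i j :=
  pvVS_all g j i _ le_rfl (pvVS_le g j i)

-- the start cell of a piece is itself a start
theorem pvSC_start (g : List String) (i j : Nat) :
    pvSC g (pvSC g i j).1 (pvSC g i j).2 = pvSC g i j := by
  unfold pvSC
  split
  · next h =>
    simp only
    rw [if_pos (pvHS_char g i j h), pvHS_congr g i j _ le_rfl (pvHS_le g i j)]
  · next h =>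
    simp only
    rw [if_neg (by rw [pvVS_char g j i]; exact h), pvVS_congr g j i _ le_rfl (pvVS_le g j i)]

theorem pvRM_sc_le (g : List String) (m i j : Nat) :
    pvRM m (pvSC g i j) ≤ pvRM m (i, j) := by
  unfold pvSC pvRM
  split
  · simp only
    have := pvHS_le g i j; omega
  · simp only
    have := pvVS_le g j i
    exact Nat.add_le_add_right (Nat.mul_le_mul_right m this) j

theorem pvRM_inj (m : Nat) (p q : Nat × Nat) (hp : p.2 < m) (hq : q.2 < m)
    (h : pvRM m p = pvRM m q) : p = q := by
  unfold pvRM at h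
  obtain ⟨a, b⟩ := p; obtain ⟨c, d⟩ := q
  simp only at *
  have : a = c := by
    by_contra hne
    rcases Nat.lt_or_ge a c with hlt | hge
    · nlinarith [Nat.mul_le_mul_right m (Nat.succ_le_of_lt hlt)]
    · have hlt : c < a := by omega
      nlinarith [Nat.mul_le_mul_right m (Nat.succ_le_of_lt hlt)]
  subst this
  simp_all

-- the second coordinate of a start cell stays in range
theorem pvSC_snd_lt (g : List String) (m i j : Nat) (hj : j < m) : (pvSC g i j).2 < m := by
  unfold pvSC; split
  · simp only; have := pvHS_le g i j; omega
  · simpa using hj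

-- ===== matrix representation lemmas =====

theorem pvVGet_mk (n m : Nat) (f : Nat → Nat → Bool) (x y : Nat) (hx : x < n) (hy : y < m) :
    pvVGet (pvMk n m f) ↑x ↑y = f x y := by
  simp [pvVGet, pvMk, List.getD_eq_getElem?_getD, hx, hy]

theorem pvVSet_mk (n m : Nat) (f : Nat → Nat → Bool) (x y : Nat) (hx : x < n) (hy : y < m) :
    pvVSet (pvMk n m f) ↑x ↑y
      = pvMk n m (fun a b => if a = x ∧ b = y then true else f a b) := by
  unfold pvVSet pvMk
  apply List.ext_getElem
  · simp
  · intro a h1 h2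
    rw [List.getElem_modify]
    simp only [List.getElem_map, List.getElem_range, Int.toNat_natCast]
    simp only [List.length_modify, List.length_map, List.length_range] at h1
    by_cases hax : x = a
    · subst hax
      rw [if_pos rfl]
      apply List.ext_getElem
      · simp
      · intro b hb1 hb2
        rw [List.getElem_set]
        simp only [List.getElem_map, List.getElem_range]
        by_cases hby : y = b
        · subst hby; simp
        · rw [if_neg hby, if_neg (by tauto)]
    · rw [if_neg hax]
      apply List.map_congr_left
      intro b _
      rw [if_neg (by tauto)]

theorem pvMk_congr (n m : Nat) (f f' : Nat → Nat → Bool)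
    (h : ∀ a < n, ∀ b < m, f a b = f' a b) : pvMk n m f = pvMk n m f' := by
  unfold pvMk
  apply List.map_congr_left
  intro a ha
  apply List.map_congr_left
  intro b hb
  exact h a (List.mem_range.mp ha) b (List.mem_range.mp hb)

theorem pvBfsLoop_nil (fuel : Nat) (g : List String) (v : List (List Bool)) (N M dx dy : Int) :
    pvBfsLoop fuel [] g v N M dx dy = v := by
  cases fuel <;> rfl

theorem pvMk_false (n m : Nat) :
    pvMk n m (fun _ _ => false) = List.replicate n (List.replicate m false) := by
  unfold pvMk
  rw [List.map_const', List.length_range]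
  congr 1
  rw [List.map_const', List.length_range]

-- generic pyRange → List.range fold conversion
theorem foldl_pyRange_cast {α : Type} (N : Int) (f : α → Int → α) (init : α) :
    (PySem.List.pyRange 0 N 1).foldl f init
      = (List.range N.toNat).foldl (fun s (k : Nat) => f s ↑k) init := by
  rw [PySem.List.pyRange_one, List.foldl_map]
  simp only [Int.sub_zero, zero_add]

-- ===== the BFS walk lemmas =====

theorem walkH (g : List String) (n m i j : Nat) (hi : i < n) (hj : j < m)
    (hstart : pvHS g i j = j) (hch : cN g i j = '-') :
    ∀ fuel y, j ≤ y → y < m → (∀ t, j ≤ t → t ≤ y → cN g i t = '-') → m - y ≤ fuel →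
    pvBfsLoop fuel [((i : Int), (y : Int))] g
      (pvMk n m (fun a b => pvVb g m (i*m+j) a b || (decide (a = i) && decide (j ≤ b) && decide (b ≤ y)))) ↑n ↑m 0 1
      = pvMk n m (pvVb g m (i*m+j+1)) := by
  intro fuel
  induction fuel with
  | zero => intro y h1 h2 _ h4; omega
  | succ f ih =>
    intro y h1 h2 hrun hfuel
    rw [pvBfsLoop]
    simp only [add_zero, List.nil_append]
    rw [show ((y : Int) + 1) = (((y + 1 : Nat)) : Int) from by push_cast; ring]
    by_cases hnext : y + 1 < m ∧ cN g i (y + 1) = '-'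
    · rw [if_pos]
      · rw [pvVSet_mk n m _ i (y+1) hi hnext.1]
        have hset : pvMk n m (fun a b => if a = i ∧ b = y + 1 then true
              else pvVb g m (i*m+j) a b || (decide (a = i) && decide (j ≤ b) && decide (b ≤ y)))
            = pvMk n m (fun a b => pvVb g m (i*m+j) a b || (decide (a = i) && decide (j ≤ b) && decide (b ≤ y + 1))) := by
          apply pvMk_congr
          intro a _ b _
          by_cases hab : a = i ∧ b = y + 1
          · rw [if_pos hab, hab.1, hab.2]
            simp [show j ≤ y + 1 by omega]
          · rw [if_neg hab]
            by_cases ha : a = i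
            · subst ha
              have hb : b ≠ y + 1 := fun hb => hab ⟨rfl, hb⟩
              by_cases hby : b ≤ y
              · simp [hby, show b ≤ y + 1 by omega]
              · simp [hby, show ¬ b ≤ y + 1 by omega]
            · simp [ha]
        rw [hset]
        exact ih (y+1) (by omega) hnext.1
          (fun t ht1 ht2 => by
            rcases Nat.le_succ_iff.mp ht2 with h | h
            · exact hrun t ht1 h
            · subst h; exact hnext.2)
          (by omega)
      · -- the guard holds
        refine ⟨by positivity, by exact_mod_cast hi, by positivity, by exact_mod_cast hnext.1, ?_, ?_⟩
        · rw [pvVGet_mk n m _ i (y+1) hi hnext.1]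
          have hhs : pvHS g i (y+1) = j :=
            pvHS_of_run g i j (y+1) (by omega) hstart
              (fun t ht1 ht2 => hrun t ht1 (by omega))
          have hsc : pvSC g i (y+1) = (i, j) := by
            unfold pvSC; rw [if_pos hnext.2, hhs]
          simp [pvVb, hsc, pvRM, show ¬ (y + 1 ≤ y) by omega]
        · rw [pvGrid_cast, pvGrid_cast]
          simp only [Int.toNat_natCast]
          show cN g i (y+1) = cN g i y
          rw [hnext.2, hrun y h1 le_rfl]
    · rw [if_neg]
      · rw [pvBfsLoop_nil]
        apply pvMk_congr
        intro a ha b hb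
        have key : pvSC g a b = (i, j) ↔ (a = i ∧ j ≤ b ∧ b ≤ y) := by
          constructor
          · intro h
            unfold pvSC at h
            by_cases hc : cN g a b = '-'
            · rw [if_pos hc] at h
              have hai : a = i := congrArg Prod.fst h
              have hhs : pvHS g a b = j := congrArg Prod.snd h
              have hjb : j ≤ b := by have := pvHS_le g a b; omega
              refine ⟨hai, hjb, ?_⟩
              by_contra hby
              rcases Nat.lt_or_ge (y+1) b with hlt | hge
              · have hdash : cN g a (y+1) = '-' :=
                  pvHS_all g a b (y+1) (by omega) hlt
                rw [hai] at hdash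
                exact hnext ⟨by omega, hdash⟩
              · have hbe : b = y + 1 := by omega
                rw [hai, hbe] at hc
                exact hnext ⟨by omega, hc⟩
            · rw [if_neg hc] at h
              have hbj : b = j := congrArg Prod.snd h
              have hvs : pvVS g b a = i := congrArg Prod.fst h
              exfalso
              have hcc := pvVS_char g b a
              rw [hvs, hbj, hch] at hcc
              apply hc
              rw [hbj]
              exact hcc.symm
          · rintro ⟨hai, hjb, hby⟩
            rw [hai]
            have hcb : cN g i b = '-' := hrun b hjb hby
            unfold pvSC
            rw [if_pos hcb,
                pvHS_of_run g i j b hjb hstart (fun t ht1 ht2 => hrun t ht1 (by omega))]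
        have key2 : pvRM m (pvSC g a b) = i*m+j ↔ pvSC g a b = (i, j) := by
          constructor
          · intro h
            exact pvRM_inj m _ (i, j) (pvSC_snd_lt g m a b hb) (by simpa using hj)
              (by simpa [pvRM] using h)
          · intro h; rw [h]; rfl
        rw [Bool.eq_iff_iff]
        simp only [pvVb, Bool.or_eq_true, Bool.and_eq_true, decide_eq_true_iff]
        constructor
        · rintro (h | ⟨⟨h1', h2'⟩, h3'⟩)
          · omega
          · have := key2.mpr (key.mpr ⟨h1', h2', h3'⟩)
            omega
        · intro h
          rcases Nat.lt_succ_iff_lt_or_eq.mp h with h | h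
          · exact Or.inl h
          · exact Or.inr (by
              obtain ⟨h1', h2', h3'⟩ := key.mp (key2.mp h)
              exact ⟨⟨h1', h2'⟩, h3'⟩)
      · -- the guard fails
        rintro ⟨-, -, -, hlt, -, hc⟩
        have hy1 : y + 1 < m := by exact_mod_cast hlt
        rw [pvGrid_cast, pvGrid_cast] at hc
        simp only [Int.toNat_natCast] at hc
        have hc' : cN g i (y+1) = cN g i y := hc
        exact hnext ⟨hy1, by rw [hc', hrun y h1 le_rfl]⟩

theorem walkV (g : List String) (n m i j : Nat) (hi : i < n) (hj : j < m)
    (hstart : pvVS g j i = i) (hch : ¬ cN g i j = '-') :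
    ∀ fuel x, i ≤ x → x < n → (∀ t, i ≤ t → t ≤ x → cN g t j = cN g i j) → n - x ≤ fuel →
    pvBfsLoop fuel [((x : Int), (j : Int))] g
      (pvMk n m (fun a b => pvVb g m (i*m+j) a b || (decide (i ≤ a) && decide (a ≤ x) && decide (b = j)))) ↑n ↑m 1 0
      = pvMk n m (pvVb g m (i*m+j+1)) := by
  intro fuel
  induction fuel with
  | zero => intro x h1 h2 _ h4; omega
  | succ f ih =>
    intro x h1 h2 hrun hfuel
    rw [pvBfsLoop]
    simp only [add_zero, List.nil_append]
    rw [show ((x : Int) + 1) = (((x + 1 : Nat)) : Int) from by push_cast; ring]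
    by_cases hnext : x + 1 < n ∧ cN g (x + 1) j = cN g x j
    · rw [if_pos]
      · rw [pvVSet_mk n m _ (x+1) j hnext.1 hj]
        have hset : pvMk n m (fun a b => if a = x + 1 ∧ b = j then true
              else pvVb g m (i*m+j) a b || (decide (i ≤ a) && decide (a ≤ x) && decide (b = j)))
            = pvMk n m (fun a b => pvVb g m (i*m+j) a b || (decide (i ≤ a) && decide (a ≤ x + 1) && decide (b = j))) := by
          apply pvMk_congr
          intro a _ b _
          by_cases hab : a = x + 1 ∧ b = j
          · rw [if_pos hab, hab.1, hab.2]
            simp [show i ≤ x + 1 by omega]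
          · rw [if_neg hab]
            by_cases hb : b = j
            · subst hb
              have ha : a ≠ x + 1 := fun ha => hab ⟨ha, rfl⟩
              by_cases hax : a ≤ x
              · simp [hax, show a ≤ x + 1 by omega]
              · simp [hax, show ¬ a ≤ x + 1 by omega]
            · simp [hb]
        rw [hset]
        exact ih (x+1) (by omega) hnext.1
          (fun t ht1 ht2 => by
            rcases Nat.le_succ_iff.mp ht2 with h | h
            · exact hrun t ht1 h
            · subst h; rw [hnext.2, hrun x h1 le_rfl])
          (by omega)
      · refine ⟨by positivity, by exact_mod_cast hnext.1, by positivity, by exact_mod_cast hj, ?_, ?_⟩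
        · rw [pvVGet_mk n m _ (x+1) j hnext.1 hj]
          have hcx1 : cN g (x+1) j = cN g i j := by
            rw [hnext.2, hrun x h1 le_rfl]
          have hvs : pvVS g j (x+1) = i := by
            rw [pvVS, if_pos hnext.2.symm]
            exact pvVS_of_run g j i x h1 hstart hrun
          have hsc : pvSC g (x+1) j = (i, j) := by
            unfold pvSC
            rw [if_neg (by rw [hcx1]; exact hch), hvs]
          simp [pvVb, hsc, pvRM, show ¬ (x + 1 ≤ x) by omega]
        · rw [pvGrid_cast, pvGrid_cast]
          simp only [Int.toNat_natCast]
          show cN g (x+1) j = cN g x j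
          exact hnext.2
    · rw [if_neg]
      · rw [pvBfsLoop_nil]
        apply pvMk_congr
        intro a ha b hb
        have key : pvSC g a b = (i, j) ↔ (i ≤ a ∧ a ≤ x ∧ b = j) := by
          constructor
          · intro h
            unfold pvSC at h
            by_cases hc : cN g a b = '-'
            · rw [if_pos hc] at h
              have hai : a = i := congrArg Prod.fst h
              have hhs : pvHS g a b = j := congrArg Prod.snd h
              exfalso
              have hcc := pvHS_char g a b hc
              rw [hhs, hai] at hcc
              exact hch hcc
            · rw [if_neg hc] at h
              have hbj : b = j := congrArg Prod.snd h
              have hvs : pvVS g b a = i := congrArg Prod.fst h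
              have hia : i ≤ a := by have := pvVS_le g b a; omega
              refine ⟨hia, ?_, hbj⟩
              by_contra hax
              rcases Nat.lt_or_ge (x+1) n with hn | hn
              · have e1 : cN g (x+1) b = cN g a b :=
                  pvVS_all g b a (x+1) (by omega) (by omega)
                have e2 : cN g x b = cN g a b :=
                  pvVS_all g b a x (by rw [hvs]; omega) (by omega)
                rw [hbj] at e1 e2
                exact hnext ⟨hn, by rw [e1, e2]⟩
              · omega
          · rintro ⟨hia, hax, hbj⟩
            rw [hbj]
            have hcb : cN g a j = cN g i j := hrun a hia hax
            unfold pvSC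
            rw [if_neg (by rw [hcb]; exact hch),
                pvVS_of_run g j i a hia hstart (fun t ht1 ht2 => hrun t ht1 (by omega))]
        have key2 : pvRM m (pvSC g a b) = i*m+j ↔ pvSC g a b = (i, j) := by
          constructor
          · intro h
            exact pvRM_inj m _ (i, j) (pvSC_snd_lt g m a b hb) (by simpa using hj)
              (by simpa [pvRM] using h)
          · intro h; rw [h]; rfl
        rw [Bool.eq_iff_iff]
        simp only [pvVb, Bool.or_eq_true, Bool.and_eq_true, decide_eq_true_iff]
        constructor
        · rintro (h | ⟨⟨h1', h2'⟩, h3'⟩)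
          · omega
          · have := key2.mpr (key.mpr ⟨h1', h2', h3'⟩)
            omega
        · intro h
          rcases Nat.lt_succ_iff_lt_or_eq.mp h with h | h
          · exact Or.inl h
          · exact Or.inr (by
              obtain ⟨h1', h2', h3'⟩ := key.mp (key2.mp h)
              exact ⟨⟨h1', h2'⟩, h3'⟩)
      · rintro ⟨-, hlt, -, -, -, hc⟩
        have hx1 : x + 1 < n := by exact_mod_cast hlt
        rw [pvGrid_cast, pvGrid_cast] at hc
        simp only [Int.toNat_natCast] at hc
        exact hnext ⟨hx1, hc⟩

-- a BFS launched at a run start marks exactly that run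
theorem bfs_start (g : List String) (n m i j : Nat) (hi : i < n) (hj : j < m)
    (hstart : pvSC g i j = (i, j)) :
    pvBfs ↑i ↑j g (pvMk n m (pvVb g m (i*m+j))) ↑n ↑m = pvMk n m (pvVb g m (i*m+j+1)) := by
  unfold pvBfs
  have hfuel : ((n : Int).toNat * (m : Int).toNat + 1) = n * m + 1 := by simp
  have hset := pvVSet_mk n m (pvVb g m (i*m+j)) i j hi hj
  by_cases hch : cN g i j = '-'
  · have hd : (if pvGrid g ↑i ↑j = '-' then ((0 : Int), (1 : Int)) else (1, 0)) = (0, 1) := by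
      rw [pvGrid_cast]; simp only [Int.toNat_natCast]; rw [if_pos hch]
    simp only [hd, hset, hfuel]
    have hF : pvMk n m (fun a b => if a = i ∧ b = j then true else pvVb g m (i*m+j) a b)
        = pvMk n m (fun a b => pvVb g m (i*m+j) a b || (decide (a = i) && decide (j ≤ b) && decide (b ≤ j))) := by
      apply pvMk_congr
      intro a _ b _
      by_cases hab : a = i ∧ b = j
      · rw [if_pos hab, hab.1, hab.2]; simp
      · rw [if_neg hab]
        rw [Bool.eq_iff_iff]
        simp only [Bool.or_eq_true, Bool.and_eq_true, decide_eq_true_iff]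
        constructor
        · exact Or.inl
        · rintro (h | ⟨⟨ha, h1⟩, h2⟩)
          · exact h
          · exact absurd ⟨ha, by omega⟩ hab
    rw [hF]
    have hhs : pvHS g i j = j := by
      have h := hstart
      unfold pvSC at h
      rw [if_pos hch] at h
      exact congrArg Prod.snd h
    exact walkH g n m i j hi hj hhs hch (n*m+1) j le_rfl hj
      (fun t ht1 ht2 => by rw [show t = j by omega]; exact hch)
      (by have := Nat.le_mul_of_pos_left m (show 0 < n by omega); omega)
  · have hd : (if pvGrid g ↑i ↑j = '-' then ((0 : Int), (1 : Int)) else (1, 0)) = (1, 0) := by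
      rw [pvGrid_cast]; simp only [Int.toNat_natCast]; rw [if_neg hch]
    simp only [hd, hset, hfuel]
    have hF : pvMk n m (fun a b => if a = i ∧ b = j then true else pvVb g m (i*m+j) a b)
        = pvMk n m (fun a b => pvVb g m (i*m+j) a b || (decide (i ≤ a) && decide (a ≤ i) && decide (b = j))) := by
      apply pvMk_congr
      intro a _ b _
      by_cases hab : a = i ∧ b = j
      · rw [if_pos hab, hab.1, hab.2]; simp
      · rw [if_neg hab]
        rw [Bool.eq_iff_iff]
        simp only [Bool.or_eq_true, Bool.and_eq_true, decide_eq_true_iff]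
        constructor
        · exact Or.inl
        · rintro (h | ⟨⟨h1', h2'⟩, hb⟩)
          · exact h
          · exact absurd ⟨by omega, hb⟩ hab
    rw [hF]
    have hvs : pvVS g j i = i := by
      have h := hstart
      unfold pvSC at h
      rw [if_neg hch] at h
      exact congrArg Prod.fst h
    exact walkV g n m i j hi hj hvs hch (n*m+1) i le_rfl hi
      (fun t ht1 ht2 => by rw [show t = i by omega])
      (by have := Nat.le_mul_of_pos_right n (show 0 < m by omega); omega)

-- B's per-cell condition holds exactly at run starts
theorem startB_iff (g : List String) (i j : Nat) :
    (if cN g i j = '-' then ((j:Int) = 0 ∨ ¬ pvGrid g ↑i ((j:Int) - 1) = '-')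
     else ((i:Int) = 0 ∨ ¬ pvGrid g ((i:Int) - 1) ↑j = cN g i j))
    ↔ pvSC g i j = (i, j) := by
  by_cases hch : cN g i j = '-'
  · rw [if_pos hch]
    unfold pvSC
    rw [if_pos hch]
    have h2 : ((i, pvHS g i j) = (i, j)) ↔ pvHS g i j = j := by simp
    rw [h2, pvHS_self_iff]
    by_cases hj0 : j = 0
    · subst hj0; simp
    · have hc1 : ¬ ((j:Int) = 0) := fun h => hj0 (by exact_mod_cast h)
      have hc2 : pvGrid g ↑i ((j:Int) - 1) = cN g i (j - 1) := by
        rw [pvGrid_cast]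
        simp only [Int.toNat_natCast]
        rw [show ((j:Int) - 1).toNat = j - 1 by omega]
      rw [hc2]
      simp [hj0, hc1]
  · rw [if_neg hch]
    unfold pvSC
    rw [if_neg hch]
    have h2 : ((pvVS g j i, j) = (i, j)) ↔ pvVS g j i = i := by simp
    rw [h2, pvVS_self_iff]
    by_cases hi0 : i = 0
    · subst hi0; simp
    · have hc1 : ¬ ((i:Int) = 0) := fun h => hi0 (by exact_mod_cast h)
      have hc2 : pvGrid g ((i:Int) - 1) ↑j = cN g (i - 1) j := by
        rw [pvGrid_cast]
        simp only [Int.toNat_natCast]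
        rw [show ((i:Int) - 1).toNat = i - 1 by omega]
      rw [hc2]
      simp [hi0, hc1]

-- one cell of the scan: A's visited test + BFS agree with B's stateless test
theorem cellStep (g : List String) (n m i j : Nat) (hi : i < n) (hj : j < m) (c : Int) :
    (if pvVGet (pvMk n m (pvVb g m (i*m+j))) ↑i ↑j = false
      then (pvBfs ↑i ↑j g (pvMk n m (pvVb g m (i*m+j))) ↑n ↑m, c + 1)
      else (pvMk n m (pvVb g m (i*m+j)), c))
    = (pvMk n m (pvVb g m (i*m+j+1)),
       if pvGrid g ↑i ↑j = '-' then
         (if (j:Int) = 0 ∨ ¬ pvGrid g ↑i ((j:Int) - 1) = '-' then c + 1 else c)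
       else
         (if (i:Int) = 0 ∨ ¬ pvGrid g ((i:Int) - 1) ↑j = pvGrid g ↑i ↑j then c + 1 else c)) := by
  have hgrid : pvGrid g ↑i ↑j = cN g i j := by
    rw [pvGrid_cast]; simp
  rw [hgrid]
  have hsplit : (if cN g i j = '-' then
         (if (j:Int) = 0 ∨ ¬ pvGrid g ↑i ((j:Int) - 1) = '-' then c + 1 else c)
       else
         (if (i:Int) = 0 ∨ ¬ pvGrid g ((i:Int) - 1) ↑j = cN g i j then c + 1 else c))
      = (if (if cN g i j = '-' then ((j:Int) = 0 ∨ ¬ pvGrid g ↑i ((j:Int) - 1) = '-')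
             else ((i:Int) = 0 ∨ ¬ pvGrid g ((i:Int) - 1) ↑j = cN g i j))
         then c + 1 else c) := by
    by_cases hch : cN g i j = '-' <;> simp [hch]
  rw [hsplit]
  have hvg : pvVGet (pvMk n m (pvVb g m (i*m+j))) ↑i ↑j = pvVb g m (i*m+j) i j :=
    pvVGet_mk n m _ i j hi hj
  rw [hvg]
  have hrm : pvRM m (i, j) = i*m+j := rfl
  have hiff1 : pvVb g m (i*m+j) i j = false ↔ pvSC g i j = (i, j) := by
    have hle := pvRM_sc_le g m i j
    simp only [pvVb, decide_eq_false_iff_not, Nat.not_lt]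
    constructor
    · intro h
      exact pvRM_inj m _ (i, j) (pvSC_snd_lt g m i j hj) (by simpa using hj)
        (by rw [hrm]; rw [hrm] at hle; omega)
    · intro h; rw [h, hrm]
  by_cases hs : pvSC g i j = (i, j)
  · rw [if_pos (hiff1.mpr hs), if_pos ((startB_iff g i j).mpr hs),
        bfs_start g n m i j hi hj hs]
  · rw [if_neg (fun h => hs (hiff1.mp h)),
        if_neg (fun h => hs ((startB_iff g i j).mp h))]
    have hmk : pvMk n m (pvVb g m (i*m+j)) = pvMk n m (pvVb g m (i*m+j+1)) := by
      apply pvMk_congr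
      intro a ha b hb
      have hne : pvRM m (pvSC g a b) ≠ i*m+j := by
        intro h
        have heq : pvSC g a b = (i, j) :=
          pvRM_inj m _ (i, j) (pvSC_snd_lt g m a b hb) (by simpa using hj) (by rw [h]; rfl)
        have hgb := pvSC_start g a b
        rw [heq] at hgb
        exact hs hgb
      rw [Bool.eq_iff_iff]
      simp only [pvVb, decide_eq_true_iff]
      omega
    rw [hmk]

-- the inner loop invariant over one row
theorem rowInv (g : List String) (n m i : Nat) (hi : i < n) (c : Int) :
    ∀ j, j ≤ m →
    (List.range j).foldl
      (fun s (t : Nat) => if pvVGet s.1 ↑i ↑t = false then (pvBfs ↑i ↑t g s.1 ↑n ↑m, s.2 + 1) else s)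
      (pvMk n m (pvVb g m (i*m)), c)
    = (pvMk n m (pvVb g m (i*m+j)),
       (List.range j).foldl
         (fun c (t : Nat) => if pvGrid g ↑i ↑t = '-' then
             (if (t:Int) = 0 ∨ ¬ pvGrid g ↑i ((t:Int) - 1) = '-' then c + 1 else c)
           else
             (if (i:Int) = 0 ∨ ¬ pvGrid g ((i:Int) - 1) ↑t = pvGrid g ↑i ↑t then c + 1 else c))
         c) := by
  intro j
  induction j with
  | zero => intro _; simp
  | succ j ih =>
    intro hj
    rw [List.range_succ, List.foldl_append, List.foldl_append, ih (by omega)]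
    simp only [List.foldl_cons, List.foldl_nil]
    rw [show i*m+(j+1) = i*m+j+1 by ring]
    exact cellStep g n m i j hi (by omega) _

-- the outer loop invariant over the rows
theorem gridInv (g : List String) (n m : Nat) :
    ∀ i, i ≤ n →
    (List.range i).foldl
      (fun s (t : Nat) => (List.range m).foldl
        (fun s (j : Nat) => if pvVGet s.1 ↑t ↑j = false then (pvBfs ↑t ↑j g s.1 ↑n ↑m, s.2 + 1) else s) s)
      (pvMk n m (pvVb g m 0), (0 : Int))
    = (pvMk n m (pvVb g m (i*m)),
       (List.range i).foldl
         (fun c (t : Nat) => (List.range m).foldl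
           (fun c (j : Nat) => if pvGrid g ↑t ↑j = '-' then
               (if (j:Int) = 0 ∨ ¬ pvGrid g ↑t ((j:Int) - 1) = '-' then c + 1 else c)
             else
               (if (t:Int) = 0 ∨ ¬ pvGrid g ((t:Int) - 1) ↑j = pvGrid g ↑t ↑j then c + 1 else c))
           c)
         (0 : Int)) := by
  intro i
  induction i with
  | zero => intro _; simp
  | succ i ih =>
    intro hi
    rw [List.range_succ, List.foldl_append, List.foldl_append, ih (by omega)]
    simp only [List.foldl_cons, List.foldl_nil]
    have hr := rowInv g n m i (by omega)
      ((List.range i).foldl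
        (fun c (t : Nat) => (List.range m).foldl
          (fun c (j : Nat) => if pvGrid g ↑t ↑j = '-' then
              (if (j:Int) = 0 ∨ ¬ pvGrid g ↑t ((j:Int) - 1) = '-' then c + 1 else c)
            else
              (if (t:Int) = 0 ∨ ¬ pvGrid g ((t:Int) - 1) ↑j = pvGrid g ↑t ↑j then c + 1 else c))
          c)
        0) m le_rfl
    rw [show i*m+m = (i+1)*m by ring] at hr
    exact hr

-- ===== VERDICT (by name: the statement is the Claim_ definition above) =====
theorem count_wood_spec : Claim_equal_count_wood := by
  intro N M wl _ _
  unfold Spec_count_wood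
  have hA : count_wood N M wl =
      ((List.range N.toNat).foldl
        (fun s (t : Nat) => (List.range M.toNat).foldl
          (fun s (j : Nat) => if pvVGet s.1 ↑t ↑j = false then (pvBfs ↑t ↑j wl s.1 N M, s.2 + 1) else s) s)
        (List.replicate N.toNat (List.replicate M.toNat false), (0 : Int))).2 := by
    unfold count_wood
    show ((PySem.List.pyRange 0 N 1).foldl (fun s i => pvInner wl N M i s)
        (List.replicate N.toNat (List.replicate M.toNat false), 0)).2 = _
    rw [foldl_pyRange_cast]
    congr 1
    congr 1
    funext s k
    unfold pvInner
    rw [foldl_pyRange_cast]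
  have hB : count_wood_alt N M wl =
      (List.range N.toNat).foldl
        (fun c (t : Nat) => (List.range M.toNat).foldl
          (fun c (j : Nat) => if pvGrid wl ↑t ↑j = '-' then
              (if (j:Int) = 0 ∨ ¬ pvGrid wl ↑t ((j:Int) - 1) = '-' then c + 1 else c)
            else
              (if (t:Int) = 0 ∨ ¬ pvGrid wl ((t:Int) - 1) ↑j = pvGrid wl ↑t ↑j then c + 1 else c)) c)
        (0 : Int) := by
    unfold count_wood_alt
    rw [foldl_pyRange_cast]
    congr 1
    funext c k
    rw [foldl_pyRange_cast]
  rw [hA, hB]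
  by_cases hNM : 0 < N ∧ 0 < M
  · obtain ⟨hN, hM⟩ := hNM
    obtain ⟨n, rfl⟩ : ∃ n : Nat, N = ↑n := ⟨N.toNat, (Int.toNat_of_nonneg hN.le).symm⟩
    obtain ⟨m, rfl⟩ : ∃ m : Nat, M = ↑m := ⟨M.toNat, (Int.toNat_of_nonneg hM.le).symm⟩
    simp only [Int.toNat_natCast]
    rw [show List.replicate n (List.replicate m false) = pvMk n m (pvVb wl m 0) from by
          rw [← pvMk_false]; exact pvMk_congr n m _ _ (fun a _ b _ => by simp [pvVb])]
    rw [gridInv wl n m n le_rfl]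
  · rcases (not_and_or.mp hNM) with h | h
    · rw [show N.toNat = 0 by omega]
      simp
    · rw [show M.toNat = 0 by omega]
      simp
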